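-- pv_equiv track=rewrite | github.com/mulatta/MULTI-evolve | multievolve/utils/other_utils.py | msa_splicer
-- ===== SOURCE A (Python) =====
-- def msa_splicer(msa):
--     """
--     Splice the MSA to only include positions where the first sequence is not empty.
--
--     Args:
--     - msa (list): List of (description, sequence) tuples.
--
--     Returns:
--     - list: Spliced MSA.
--     """
--     base_sequence = msa[0][1]
--     positions = [i for i, _ in enumerate(base_sequence) if base_sequence[i] != "-"]
--
--     spliced_msa = []
--     for name, seq in msa:
--         spliced_seq = [seq[i] for i in positions]
--         spliced_msa.append((name, "".join(spliced_seq)))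
--
--     return spliced_msa
-- ===== SOURCE B (Python) =====
-- def msa_splicer(msa):
--     """
--     Splice the MSA to only include positions where the first sequence is not empty.
--
--     Args:
--     - msa (list): List of (description, sequence) tuples.
--
--     Returns:
--     - list: Spliced MSA.
--     """
--     base_sequence = msa[0][1]
--     builders = [[] for _ in msa]
--     for i, b in enumerate(base_sequence):
--         if b != "-":
--             for builder, (_, seq) in zip(builders, msa):
--                 builder.append(seq[i])
--     return [(name, "".join(chars)) for (name, _), chars in zip(msa, builders)]
-- ===== Notes on version B (the rewrite author's own statement) =====
-- stated objective: alternative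
-- what changed: Column-major construction: instead of A's precomputed positions list and a per-sequence row filter, B makes a single pass over the base sequence's columns and, for each non-gap column, appends that column's character to a per-sequence builder list (transpose-style traversal), joining the builders at the end.
import Mathlib
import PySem

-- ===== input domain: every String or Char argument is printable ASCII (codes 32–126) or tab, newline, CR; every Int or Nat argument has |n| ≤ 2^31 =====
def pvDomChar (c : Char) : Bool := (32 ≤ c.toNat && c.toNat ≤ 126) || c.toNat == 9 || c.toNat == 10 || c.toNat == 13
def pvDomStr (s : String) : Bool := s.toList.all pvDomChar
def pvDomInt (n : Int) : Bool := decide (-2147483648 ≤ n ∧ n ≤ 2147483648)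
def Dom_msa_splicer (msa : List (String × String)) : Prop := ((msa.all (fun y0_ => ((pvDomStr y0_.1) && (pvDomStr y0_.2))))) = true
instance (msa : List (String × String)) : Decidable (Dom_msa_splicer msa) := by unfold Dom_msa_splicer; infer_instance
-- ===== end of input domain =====

-- B builds the spliced MSA column-major: one pass over the base columns appending each
-- kept column to per-sequence builders, instead of A's per-row filtering; same cost.


-- ===== PORT A =====
-- msa[0][1]; Pre_ excludes msa = [] (IndexError), so the default is never used there.
def msa_splicer (msa : List (String × String)) : List (String × String) :=
  let base := (PySem.List.pyGetD msa 0 ("", "")).2.toList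
  let positions := ((PySem.List.enumerate base 0).filter
    (fun p => PySem.List.pyGetD base p.1 '?' ≠ '-')).map (·.1)
  msa.map (fun nr =>
    (nr.1, String.mk (positions.map (fun i => PySem.List.pyGetD nr.2.toList i '?'))))

-- ===== PORT B =====
-- Column-major: fold over enumerate(base); on each non-gap column append seq[i] to each
-- sequence's builder (zip builders msa); finally zip msa with builders and join.
-- seq[i] in range is guaranteed by Pre_; the '?' default is never used there.
def msa_splicer_alt (msa : List (String × String)) : List (String × String) :=
  let base := (PySem.List.pyGetD msa 0 ("", "")).2.toList
  let builders0 : List (List Char) := msa.map (fun _ => [])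
  let builders := (PySem.List.enumerate base 0).foldl
    (fun bs p =>
      if p.2 ≠ '-' then
        (bs.zip msa).map (fun q => q.1 ++ [PySem.List.pyGetD q.2.2.toList p.1 '?'])
      else bs) builders0
  (msa.zip builders).map (fun q => (q.1.1, String.mk q.2))

-- ===== PRECONDITION & SPEC =====
-- Pre_ excludes exactly the inputs where Python A raises: empty msa (IndexError on msa[0])
-- and MSAs where some sequence is shorter than a non-gap position of the first sequence
-- (IndexError on seq[i]).
def Pre_msa_splicer (msa : List (String × String)) : Prop :=
  msa ≠ [] ∧ ∀ p ∈ msa, ∀ k < (msa.headD ("", "")).2.toList.length,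
    (msa.headD ("", "")).2.toList.getD k '-' ≠ '-' → k < p.2.toList.length
instance (msa : List (String × String)) : Decidable (Pre_msa_splicer msa) := by
  unfold Pre_msa_splicer; infer_instance
def pvWitness_msa_splicer : (List (String × String)) := [("a", "A-C"), ("b", "XYZ")]
def Spec_msa_splicer (msa : List (String × String)) (out : List (String × String)) : Prop := out = msa_splicer_alt msa
instance (msa : List (String × String)) (out : List (String × String)) : Decidable (Spec_msa_splicer msa out) := by unfold Spec_msa_splicer; infer_instance

-- ===== CLAIM (what is proved, stated in full; the proofs are below) =====
def Claim_equal_msa_splicer : Prop := ∀ (msa : List (String × String)), Dom_msa_splicer msa → Pre_msa_splicer msa → Spec_msa_splicer msa (msa_splicer msa)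

-- ===== LEMMAS AND PROOFS =====

-- On elements of enumerate base 0, A's re-indexing test pyGetD base p.1 '?' ≠ '-'
-- coincides with the direct column test p.2 ≠ '-'.
theorem filter_enum_eq (base : List Char) :
    (PySem.List.enumerate base 0).filter (fun p => PySem.List.pyGetD base p.1 '?' ≠ '-')
      = (PySem.List.enumerate base 0).filter (fun p => p.2 ≠ '-') := by
  apply List.filter_congr
  intro p hp
  rcases (PySem.List.mem_enumerate_iff _ _ _).1 hp with ⟨k, hk, rfl⟩
  simp [PySem.List.pyGetD_natCast, List.getD_eq_getElem?_getD, hk]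

-- l zipped with its own map on the left/right: pair each element with its image.
theorem zip_map_self {A B : Type} (l : List A) (f : A → B) :
    l.zip (l.map f) = l.map (fun x => (x, f x)) := by
  induction l with
  | nil => rfl
  | cons a l ih => simp [ih]

theorem zip_map_left {A B : Type} (l : List A) (f : A → B) :
    (l.map f).zip l = l.map (fun x => (f x, x)) := by
  induction l with
  | nil => rfl
  | cons a l ih => simp [ih]

-- Invariant of B's column fold: starting from builders msa.map g, after folding a list L of
-- (index, char) pairs each builder holds g nr followed by the kept columns' characters.
theorem fold_builders (msa : List (String × String)) (L : List (Int × Char))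
    (g : (String × String) → List Char) :
    L.foldl
      (fun bs p =>
        if p.2 ≠ '-' then
          (bs.zip msa).map (fun q => q.1 ++ [PySem.List.pyGetD q.2.2.toList p.1 '?'])
        else bs) (msa.map g)
    = msa.map (fun nr => g nr ++
        ((L.filter (fun p => p.2 ≠ '-')).map
          (fun p => PySem.List.pyGetD nr.2.toList p.1 '?'))) := by
  induction L generalizing g with
  | nil => simp
  | cons p L ih =>
    by_cases h : p.2 = '-'
    · simp only [List.foldl_cons, List.filter_cons, h]
      simpa using ih g
    · simp only [List.foldl_cons, List.filter_cons, if_pos h, zip_map_left,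
        List.map_map, Function.comp_def]
      rw [ih (fun nr => g nr ++ [PySem.List.pyGetD nr.2.toList p.1 '?'])]
      simp [h]

-- ===== VERDICT (by name: the statement is the Claim_ definition above) =====
theorem msa_splicer_spec : Claim_equal_msa_splicer := by
  intro msa _ _
  simp only [Spec_msa_splicer, msa_splicer, msa_splicer_alt]
  rw [filter_enum_eq, fold_builders, zip_map_self, List.map_map]
  simp [Function.comp_def]
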